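-- pv_equiv track=rewrite | github.com/meeyun-binary/APItest | testcases/TestxExchangeRate.py | filter_currency
-- ===== SOURCE A (Python) =====
-- def filter_currency(data):
--     # use these currency because they are frequently change
--     currencies_to_keep = ("BTC", "BCH", "ETH", "LTC")
--     item_list = [e for e in data]
--     new_list = []
--     for item in currencies_to_keep:
--         new = [x for x in item_list if item in x]
--         new_list.append(new)
--
--     return new_list
-- ===== SOURCE B (Python) =====
-- def filter_currency(data):
--     # Index the four length-3 currency codes in a dict and slide a 3-char
--     # window over each item once, so the per-currency substring scans disappear.
--     index = {"BTC": 0, "BCH": 1, "ETH": 2, "LTC": 3}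
--     buckets = [[], [], [], []]
--     for x in data:
--         hit = set()
--         for i in range(len(x) - 2):
--             j = index.get(x[i:i+3])
--             if j is not None:
--                 hit.add(j)
--         for j in sorted(hit):
--             buckets[j].append(x)
--     return buckets
-- ===== Notes on version B (the rewrite author's own statement) =====
-- stated objective: alternative
-- what changed: Replaces A's four per-currency substring scans with a dict indexing the four length-3 codes and one 3-char sliding window per item, collecting matched bucket indices in a set and appending in sorted index order.
import Mathlib
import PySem

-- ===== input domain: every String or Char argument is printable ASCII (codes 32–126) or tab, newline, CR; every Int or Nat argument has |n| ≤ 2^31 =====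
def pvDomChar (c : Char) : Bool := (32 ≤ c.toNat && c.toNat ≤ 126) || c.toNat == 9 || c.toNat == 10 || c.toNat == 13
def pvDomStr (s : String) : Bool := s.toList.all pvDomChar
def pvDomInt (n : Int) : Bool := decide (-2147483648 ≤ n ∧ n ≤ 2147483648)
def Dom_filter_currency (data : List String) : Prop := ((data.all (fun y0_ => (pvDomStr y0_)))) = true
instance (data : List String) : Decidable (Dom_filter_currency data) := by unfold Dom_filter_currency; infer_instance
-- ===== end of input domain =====

-- B replaces A's four per-currency substring scans by a dict index over the four
-- length-3 codes and one 3-char sliding window per item (alternative algorithm, same cost class).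

-- ===== PORT A =====
-- A: materialize, then for each currency scan the whole list and append the filtered bucket.
def filter_currency (data : List String) : List (List String) :=
  let currencies_to_keep : List String := ["BTC", "BCH", "ETH", "LTC"]
  let item_list : List String := data.map (fun e => e)
  let new_list : List (List String) :=
    currencies_to_keep.foldl
      (fun new_list item =>
        let new := item_list.filter (fun x => PySem.Str.isIn item x)
        new_list ++ [new])
      []
  new_list

-- ===== PORT B =====
-- index = {"BTC": 0, "BCH": 1, "ETH": 2, "LTC": 3}
def fcIndex : PySem.Dict String Int :=
  PySem.Dict.ofList [("BTC", 0), ("BCH", 1), ("ETH", 2), ("LTC", 3)]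

-- B: slide a 3-char window over each item, look each window up in the dict,
-- collect the matched bucket indices in a set, append in sorted index order.
-- buckets[j].append(x) is ported as pySetD/pyGetD (j is a dict value, 0..3, always in range).
def filter_currency_alt (data : List String) : List (List String) :=
  data.foldl
    (fun (buckets : List (List String)) x =>
      let hit : PySem.Set Int :=
        (PySem.List.pyRange 0 (PySem.Str.len x - 2) 1).foldl
          (fun h i =>
            match PySem.Dict.get? fcIndex (PySem.Str.slice x (some i) (some (i + 3))) with
            | some j => PySem.Set.add h j
            | none => h)
          PySem.Set.empty
      (PySem.List.sorted hit (fun v => v)).foldl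
        (fun b j => PySem.List.pySetD b j (PySem.List.pyGetD b j [] ++ [x]))
        buckets)
    [[], [], [], []]

-- ===== PRECONDITION & SPEC =====
def Spec_filter_currency (data : List String) (out : List (List String)) : Prop := out = filter_currency_alt data
instance (data : List String) (out : List (List String)) : Decidable (Spec_filter_currency data out) := by unfold Spec_filter_currency; infer_instance

-- ===== CLAIM (what is proved, stated in full; the proofs are below) =====
def Claim_equal_filter_currency : Prop := ∀ (data : List String), Dom_filter_currency data → Spec_filter_currency data (filter_currency data)

-- ===== LEMMAS AND PROOFS =====

theorem mem_foldl_addOpt (f : Int → Option Int) (l : List Int) (s : PySem.Set Int) (j : Int) :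
    (j ∈ l.foldl (fun h i => match f i with | some v => PySem.Set.add h v | none => h) s) ↔
      j ∈ s ∨ ∃ i ∈ l, f i = some j := by
  induction l generalizing s with
  | nil => simp
  | cons a t ih =>
    simp only [List.foldl_cons, ih]
    cases hfa : f a with
    | none =>
      simp only [List.mem_cons]
      constructor
      · rintro (h | ⟨i, hi, hfi⟩)
        · exact Or.inl h
        · exact Or.inr ⟨i, Or.inr hi, hfi⟩
      · rintro (h | ⟨i, (rfl | hi), hfi⟩)
        · exact Or.inl h
        · rw [hfa] at hfi; cases hfi
        · exact Or.inr ⟨i, hi, hfi⟩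
    | some v =>
      simp only [PySem.Set.mem_add, List.mem_cons]
      constructor
      · rintro ((h | rfl) | ⟨i, hi, hfi⟩)
        · exact Or.inl h
        · exact Or.inr ⟨a, Or.inl rfl, hfa⟩
        · exact Or.inr ⟨i, Or.inr hi, hfi⟩
      · rintro (h | ⟨i, (rfl | hi), hfi⟩)
        · exact Or.inl (Or.inl h)
        · rw [hfa] at hfi; exact Or.inl (Or.inr (Option.some_inj.mp hfi).symm)
        · exact Or.inr ⟨i, hi, hfi⟩

theorem nodup_foldl_addOpt (f : Int → Option Int) (l : List Int) (s : PySem.Set Int)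
    (hs : s.Nodup) :
    (l.foldl (fun h i => match f i with | some v => PySem.Set.add h v | none => h) s).Nodup := by
  induction l generalizing s with
  | nil => exact hs
  | cons a t ih =>
    simp only [List.foldl_cons]
    cases hfa : f a with
    | none => simpa [hfa] using ih s hs
    | some v => simpa [hfa] using ih _ (PySem.Set.nodup_add s v hs)

-- a length-3 window of x equals tok at some valid offset iff tok is a substring of x
theorem window_iff (tok : String) (hlen : tok.toList.length = 3) (x : String) :
    (∃ i ∈ PySem.List.pyRange 0 (PySem.Str.len x - 2) 1,
        PySem.Str.slice x (some i) (some (i + 3)) = tok) ↔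
      PySem.Str.isIn tok x = true := by
  rw [PySem.Str.isIn_eq, ← PySem.Chars.exists_prefix_drop_iff_isIn]
  constructor
  · rintro ⟨i, hi, hsl⟩
    rw [PySem.List.mem_pyRange_one] at hi
    obtain ⟨hi0, _⟩ := hi
    refine ⟨i.toNat, ?_⟩
    have : (PySem.Str.slice x (some i) (some (i + 3))).toList = tok.toList := by rw [hsl]
    rw [PySem.Str.toList_slice, PySem.Chars.slice_eq_listSlice,
      PySem.List.slice_toNat _ hi0 (by omega)] at this
    have h3 : (i + 3).toNat - i.toNat = 3 := by omega
    rw [h3] at this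
    rw [List.prefix_iff_eq_take, hlen, this]
  · rintro ⟨n, hpre⟩
    have hle : tok.toList.length ≤ (x.toList.drop n).length := hpre.length_le
    rw [hlen, List.length_drop] at hle
    refine ⟨(n : Int), ?_, ?_⟩
    · rw [PySem.List.mem_pyRange_one]
      have hx : PySem.Str.len x = (x.toList.length : Int) := by
        simp [PySem.Str.len]
      rw [hx]
      omega
    · have := List.prefix_iff_eq_take.mp hpre
      rw [hlen] at this
      apply String.toList_injective
      rw [PySem.Str.toList_slice, PySem.Chars.slice_eq_listSlice,
        PySem.List.slice_toNat _ (by positivity) (by positivity)]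
      have h3 : ((n : Int) + 3).toNat - (n : Int).toNat = 3 := by omega
      rw [h3, Int.toNat_natCast]
      exact this.symm

theorem get?_fcIndex (s : String) :
    PySem.Dict.get? fcIndex s =
      if "BTC" = s then some 0 else if "BCH" = s then some 1
      else if "ETH" = s then some 2 else if "LTC" = s then some 3 else none := by
  have h : fcIndex = PySem.Dict.mk [("BTC", 0), ("BCH", 1), ("ETH", 2), ("LTC", 3)] := by decide
  have hnil : (PySem.Dict.mk ([] : List (String × Int))).get? s = none := rfl
  rw [h]
  simp only [PySem.Dict.get?_mk_cons, beq_iff_eq, hnil]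

-- the set of bucket indices collected for one item (B's inner window loop)
def hitOf (x : String) : PySem.Set Int :=
  (PySem.List.pyRange 0 (PySem.Str.len x - 2) 1).foldl
    (fun h i =>
      match PySem.Dict.get? fcIndex (PySem.Str.slice x (some i) (some (i + 3))) with
      | some j => PySem.Set.add h j
      | none => h)
    PySem.Set.empty

theorem hit_mem (x : String) (j : Int) :
    j ∈ hitOf x ↔
      (j = 0 ∧ PySem.Str.isIn "BTC" x = true) ∨ (j = 1 ∧ PySem.Str.isIn "BCH" x = true) ∨
      (j = 2 ∧ PySem.Str.isIn "ETH" x = true) ∨ (j = 3 ∧ PySem.Str.isIn "LTC" x = true) := by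
  rw [hitOf, mem_foldl_addOpt]
  have hemp : j ∉ (PySem.Set.empty : PySem.Set Int) := by simp [PySem.Set.empty]
  simp only [hemp, false_or]
  constructor
  · rintro ⟨i, hi, heq⟩
    rw [get?_fcIndex] at heq
    split_ifs at heq with h1 h2 h3 h4
    · exact Or.inl ⟨by simpa using heq.symm, (window_iff _ (by decide) x).mp ⟨i, hi, h1.symm⟩⟩
    · exact Or.inr (Or.inl ⟨by simpa using heq.symm, (window_iff _ (by decide) x).mp ⟨i, hi, h2.symm⟩⟩)
    · exact Or.inr (Or.inr (Or.inl ⟨by simpa using heq.symm, (window_iff _ (by decide) x).mp ⟨i, hi, h3.symm⟩⟩))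
    · exact Or.inr (Or.inr (Or.inr ⟨by simpa using heq.symm, (window_iff _ (by decide) x).mp ⟨i, hi, h4.symm⟩⟩))
  · rintro (⟨rfl, h⟩ | ⟨rfl, h⟩ | ⟨rfl, h⟩ | ⟨rfl, h⟩) <;>
      obtain ⟨i, hi, hsl⟩ := (window_iff _ (by decide) x).mpr h <;>
      refine ⟨i, hi, ?_⟩ <;> rw [get?_fcIndex, hsl] <;> simp

theorem hit_nodup (x : String) : (hitOf x).Nodup :=
  nodup_foldl_addOpt _ _ _ List.nodup_nil

-- the per-item bucket-index list, in increasing order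
def targetOf (x : String) : List Int :=
  (if PySem.Str.isIn "BTC" x then [0] else []) ++ (if PySem.Str.isIn "BCH" x then [1] else []) ++
  (if PySem.Str.isIn "ETH" x then [2] else []) ++ (if PySem.Str.isIn "LTC" x then [3] else [])

theorem target_nodup (x : String) : (targetOf x).Nodup := by
  unfold targetOf
  by_cases h1 : PySem.Str.isIn "BTC" x = true <;> by_cases h2 : PySem.Str.isIn "BCH" x = true <;>
    by_cases h3 : PySem.Str.isIn "ETH" x = true <;> by_cases h4 : PySem.Str.isIn "LTC" x = true <;>
    simp_all

theorem target_pairwise (x : String) : (targetOf x).Pairwise (fun a b => a < b) := by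
  unfold targetOf
  by_cases h1 : PySem.Str.isIn "BTC" x = true <;> by_cases h2 : PySem.Str.isIn "BCH" x = true <;>
    by_cases h3 : PySem.Str.isIn "ETH" x = true <;> by_cases h4 : PySem.Str.isIn "LTC" x = true <;>
    simp_all

theorem target_mem (x : String) (a : Int) :
    a ∈ targetOf x ↔
      (a = 0 ∧ PySem.Str.isIn "BTC" x = true) ∨ (a = 1 ∧ PySem.Str.isIn "BCH" x = true) ∨
      (a = 2 ∧ PySem.Str.isIn "ETH" x = true) ∨ (a = 3 ∧ PySem.Str.isIn "LTC" x = true) := by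
  unfold targetOf
  by_cases h1 : PySem.Str.isIn "BTC" x = true <;> by_cases h2 : PySem.Str.isIn "BCH" x = true <;>
    by_cases h3 : PySem.Str.isIn "ETH" x = true <;> by_cases h4 : PySem.Str.isIn "LTC" x = true <;>
    simp_all

theorem sorted_hit (x : String) :
    PySem.List.sorted (hitOf x) (fun v => v) = targetOf x := by
  have hperm : (targetOf x).Perm (hitOf x) :=
    (List.perm_ext_iff_of_nodup (target_nodup x) (hit_nodup x)).mpr
      (fun a => by rw [hit_mem, target_mem])
  exact PySem.List.sorted_eq_of_perm_of_pairwise_lt _ _ _ hperm (target_pairwise x)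

theorem pyGetD_b1 (b0 b1 b2 b3 : List String) : PySem.List.pyGetD [b0, b1, b2, b3] 1 [] = b1 := rfl
theorem pyGetD_b2 (b0 b1 b2 b3 : List String) : PySem.List.pyGetD [b0, b1, b2, b3] 2 [] = b2 := rfl
theorem pyGetD_b3 (b0 b1 b2 b3 : List String) : PySem.List.pyGetD [b0, b1, b2, b3] 3 [] = b3 := rfl
theorem pySetD_b0 (b0 b1 b2 b3 v : List String) : PySem.List.pySetD [b0, b1, b2, b3] 0 v = [v, b1, b2, b3] := rfl
theorem pySetD_b1 (b0 b1 b2 b3 v : List String) : PySem.List.pySetD [b0, b1, b2, b3] 1 v = [b0, v, b2, b3] := rfl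
theorem pySetD_b2 (b0 b1 b2 b3 v : List String) : PySem.List.pySetD [b0, b1, b2, b3] 2 v = [b0, b1, v, b3] := rfl
theorem pySetD_b3 (b0 b1 b2 b3 v : List String) : PySem.List.pySetD [b0, b1, b2, b3] 3 v = [b0, b1, b2, v] := rfl

theorem fold_target (x : String) (b0 b1 b2 b3 : List String) :
    (targetOf x).foldl
        (fun b j => PySem.List.pySetD b j (PySem.List.pyGetD b j [] ++ [x]))
        [b0, b1, b2, b3] =
      [b0 ++ (if PySem.Str.isIn "BTC" x then [x] else []),
       b1 ++ (if PySem.Str.isIn "BCH" x then [x] else []),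
       b2 ++ (if PySem.Str.isIn "ETH" x then [x] else []),
       b3 ++ (if PySem.Str.isIn "LTC" x then [x] else [])] := by
  unfold targetOf
  by_cases h1 : PySem.Str.isIn "BTC" x = true <;> by_cases h2 : PySem.Str.isIn "BCH" x = true <;>
    by_cases h3 : PySem.Str.isIn "ETH" x = true <;> by_cases h4 : PySem.Str.isIn "LTC" x = true <;>
    simp_all [List.foldl_cons, List.foldl_nil, pyGetD_b1, pyGetD_b2, pyGetD_b3,
      pySetD_b0, pySetD_b1, pySetD_b2, pySetD_b3]

theorem alt_fold (ys : List String) (b0 b1 b2 b3 : List String) :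
    ys.foldl
        (fun (buckets : List (List String)) x =>
          (PySem.List.sorted (hitOf x) (fun v => v)).foldl
            (fun b j => PySem.List.pySetD b j (PySem.List.pyGetD b j [] ++ [x]))
            buckets)
        [b0, b1, b2, b3] =
      [b0 ++ ys.filter (fun y => PySem.Str.isIn "BTC" y),
       b1 ++ ys.filter (fun y => PySem.Str.isIn "BCH" y),
       b2 ++ ys.filter (fun y => PySem.Str.isIn "ETH" y),
       b3 ++ ys.filter (fun y => PySem.Str.isIn "LTC" y)] := by
  induction ys generalizing b0 b1 b2 b3 with
  | nil => simp
  | cons y t ih =>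
    simp only [List.foldl_cons]
    rw [sorted_hit, fold_target, ih]
    simp only [List.filter_cons]
    split_ifs <;> simp

-- ===== VERDICT (by name: the statement is the Claim_ definition above) =====
theorem filter_currency_spec : Claim_equal_filter_currency := by
  intro data _
  unfold Spec_filter_currency
  have halt : filter_currency_alt data =
      [data.filter (fun y => PySem.Str.isIn "BTC" y),
       data.filter (fun y => PySem.Str.isIn "BCH" y),
       data.filter (fun y => PySem.Str.isIn "ETH" y),
       data.filter (fun y => PySem.Str.isIn "LTC" y)] := by
    show data.foldl
        (fun (buckets : List (List String)) x =>
          (PySem.List.sorted (hitOf x) (fun v => v)).foldl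
            (fun b j => PySem.List.pySetD b j (PySem.List.pyGetD b j [] ++ [x]))
            buckets)
        [[], [], [], []] = _
    rw [alt_fold]
    simp
  rw [halt]
  unfold filter_currency
  simp
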